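-- pv_equiv track=rewrite | github.com/Err0rCode7/algorithm | for_retry/wait/programmers/12899.py | solution
-- ===== SOURCE A (Python) =====
-- def solution(n):
-- 	result = []
-- 	while n > 0:
-- 		rest = n % 3
-- 		_next = n // 3
-- 		if _next > 0 and rest == 0:
-- 			result.append(4)
-- 			_next -= 1
-- 		else :
-- 			result.append(rest)
-- 		n = _next
-- 	answer = ""
-- 	for num in result[::-1]:
-- 		answer += str(num)
-- 	return answer
-- ===== SOURCE B (Python) =====
-- def solution(n):
--     if n <= 0:
--         return ""
--     r = n % 3
--     if r == 0:
--         return solution(n // 3 - 1) + "4"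
--     return solution(n // 3) + str(r)
-- ===== Notes on version B (the rewrite author's own statement) =====
-- stated objective: simpler
-- what changed: Replaces the while loop that accumulates digits into a list and then reverses and joins it with a direct recursion over n that builds the string most-significant-first, removing the list, the reversal and the join loop.
import Mathlib
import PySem

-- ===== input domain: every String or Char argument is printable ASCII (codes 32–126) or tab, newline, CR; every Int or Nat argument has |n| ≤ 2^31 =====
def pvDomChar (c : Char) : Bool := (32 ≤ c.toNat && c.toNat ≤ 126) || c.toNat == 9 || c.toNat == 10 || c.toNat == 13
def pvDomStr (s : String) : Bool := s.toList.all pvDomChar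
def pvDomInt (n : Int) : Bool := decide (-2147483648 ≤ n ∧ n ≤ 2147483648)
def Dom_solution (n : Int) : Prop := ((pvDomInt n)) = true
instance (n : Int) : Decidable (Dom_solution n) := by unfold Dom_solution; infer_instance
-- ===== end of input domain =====

-- B replaces A's digit-list accumulation + reversal + join loop with a direct
-- recursion over n that builds the string most-significant-first (objective: simpler).

-- ===== PORT A =====
-- the while loop, carrying the 'result' list
def solutionLoop (n : Int) (result : List Int) : List Int :=
  if n > 0 then
    let rest := PySem.Int.mod n 3
    let next := PySem.Int.floordiv n 3
    if next > 0 ∧ rest = 0 then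
      solutionLoop (next - 1) (result ++ [4])
    else
      solutionLoop next (result ++ [rest])
  else result
termination_by n.toNat
decreasing_by
  all_goals
    rw [PySem.Int.floordiv_eq_ediv_of_pos (by omega : (0:Int) < 3)] at *
    omega

def solution (n : Int) : String :=
  let result := solutionLoop n []
  -- result[::-1] ported as List.reverse (exact: full step -1 slice of a list)
  result.reverse.foldl (fun answer num => answer ++ PySem.Int.toStr num) ""

-- ===== PORT B =====
def solution_alt (n : Int) : String :=
  if n ≤ 0 then ""
  else if PySem.Int.mod n 3 = 0 then
    solution_alt (PySem.Int.floordiv n 3 - 1) ++ "4"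
  else
    solution_alt (PySem.Int.floordiv n 3) ++ PySem.Int.toStr (PySem.Int.mod n 3)
termination_by n.toNat
decreasing_by
  all_goals
    rw [PySem.Int.floordiv_eq_ediv_of_pos (by omega : (0:Int) < 3)] at *
    omega

-- ===== PRECONDITION & SPEC =====
def Spec_solution (n : Int) (out : String) : Prop := out = solution_alt n
instance (n : Int) (out : String) : Decidable (Spec_solution n out) := by unfold Spec_solution; infer_instance

-- ===== CLAIM (what is proved, stated in full; the proofs are below) =====
def Claim_equal_solution : Prop := ∀ (n : Int), Dom_solution n → Spec_solution n (solution n)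

-- ===== LEMMAS AND PROOFS =====

def pvRender (l : List Int) : String :=
  l.reverse.foldl (fun answer num => answer ++ PySem.Int.toStr num) ""

theorem pvRender_cons (d : Int) (l : List Int) :
    pvRender (d :: l) = pvRender l ++ PySem.Int.toStr d := by
  simp [pvRender, List.foldl_append]

theorem solutionLoop_acc (k : Nat) : ∀ (n : Int), n.toNat ≤ k → ∀ acc,
    solutionLoop n acc = acc ++ solutionLoop n [] := by
  induction k with
  | zero =>
    intro n hn acc
    rw [solutionLoop, solutionLoop]
    have h0 : ¬ n > 0 := by omega
    simp [h0]
  | succ k ih =>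
    intro n hn acc
    rw [solutionLoop, solutionLoop]
    by_cases h : n > 0
    · have hdiv : PySem.Int.floordiv n 3 = n / 3 :=
        PySem.Int.floordiv_eq_ediv_of_pos (by omega)
      have hle : (n / 3).toNat ≤ k := by omega
      have hle' : (n / 3 - 1).toNat ≤ k := by omega
      simp only [h, if_true, hdiv]
      split_ifs with hc
      · rw [ih _ hle' (acc ++ [4]), ih _ hle' ([] ++ [4])]
        simp
      · rw [ih _ hle (acc ++ [PySem.Int.mod n 3]), ih _ hle ([] ++ [PySem.Int.mod n 3])]
        simp
    · simp [h]

theorem solution_eq_alt (k : Nat) : ∀ (n : Int), n.toNat ≤ k →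
    pvRender (solutionLoop n []) = solution_alt n := by
  induction k with
  | zero =>
    intro n hn
    rw [solutionLoop, solution_alt]
    have h0 : ¬ n > 0 := by omega
    have hle : n ≤ 0 := by omega
    simp [h0, hle, pvRender]
  | succ k ih =>
    intro n hn
    rw [solutionLoop, solution_alt]
    by_cases h : n > 0
    · have hdiv : PySem.Int.floordiv n 3 = n / 3 :=
        PySem.Int.floordiv_eq_ediv_of_pos (by omega)
      have hmod : PySem.Int.mod n 3 = n % 3 :=
        PySem.Int.mod_eq_emod_of_pos (by omega)
      have hn0 : ¬ n ≤ 0 := by omega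
      simp only [h, if_true, hn0, if_false, hdiv, hmod]
      by_cases hr : n % 3 = 0
      · have hpos : n / 3 > 0 := by omega
        simp only [hpos, hr, and_self, if_true]
        simp only [List.nil_append]
        rw [solutionLoop_acc ((n / 3 - 1).toNat) _ le_rfl [4]]
        simp only [List.singleton_append, pvRender_cons]
        rw [ih _ (by omega)]
        rfl
      · simp only [if_false, hr, and_false, List.nil_append]
        rw [solutionLoop_acc ((n / 3).toNat) _ le_rfl [n % 3]]
        simp only [List.singleton_append, pvRender_cons]
        rw [ih _ (by omega)]
    · have hn0 : n ≤ 0 := by omega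
      simp [h, hn0, pvRender]

-- ===== VERDICT (by name: the statement is the Claim_ definition above) =====
theorem solution_spec : Claim_equal_solution := by
  intro n _
  unfold Spec_solution solution
  exact solution_eq_alt n.toNat n le_rfl
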